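-- pv_equiv track=rewrite | github.com/pr28416/Garage | temp.py | sjh
-- ===== SOURCE A (Python) =====
-- def sjh(a):
--     for i in range(len(a)):
--         foo = i
--         for j in range(i+1, len(a)):
--             if (a[foo] < a[j] and a[j] % 2 == 0):
--                 foo = j
--         a[i], a[foo] = a[foo], a[i]
--     return a
-- ===== SOURCE B (Python) =====
-- def _push(heap, e):
--     # ordered insert into the ascending-sorted pool (hand-written: no imports allowed)
--     k = 0
--     while k < len(heap) and heap[k] < e:
--         k += 1
--     heap.insert(k, e)
--
--
-- def sjh(a):
--     # Lazy-deletion priority pool: an ascending-sorted list of (-value, index) for the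
--     # even elements still in the suffix; its head is the largest even value (earliest
--     # index on ties).  Stale/expired entries are discarded only when they surface.
--     n = len(a)
--     heap = []
--     for j in range(1, n):
--         if a[j] % 2 == 0:
--             _push(heap, (-a[j], j))
--     for i in range(n):
--         while heap and (heap[0][1] <= i or a[heap[0][1]] != -heap[0][0]):
--             heap.pop(0)
--         if heap and a[i] < -heap[0][0]:
--             negv, j = heap.pop(0)
--             old = a[i]
--             a[i] = -negv
--             a[j] = old
--             if old % 2 == 0:
--                 _push(heap, (-old, j))
--     return a
-- ===== Notes on version B (the rewrite author's own statement) =====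
-- stated objective: faster
-- what changed: A rescans the whole suffix for the best even candidate at every position; B instead maintains one incremental lazy-deletion priority pool (ascending-sorted list of (-value,index) entries for even suffix elements), reading the best candidate from its head, expiring stale entries only when they surface, and pushing the displaced value after each swap.
import Mathlib
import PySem

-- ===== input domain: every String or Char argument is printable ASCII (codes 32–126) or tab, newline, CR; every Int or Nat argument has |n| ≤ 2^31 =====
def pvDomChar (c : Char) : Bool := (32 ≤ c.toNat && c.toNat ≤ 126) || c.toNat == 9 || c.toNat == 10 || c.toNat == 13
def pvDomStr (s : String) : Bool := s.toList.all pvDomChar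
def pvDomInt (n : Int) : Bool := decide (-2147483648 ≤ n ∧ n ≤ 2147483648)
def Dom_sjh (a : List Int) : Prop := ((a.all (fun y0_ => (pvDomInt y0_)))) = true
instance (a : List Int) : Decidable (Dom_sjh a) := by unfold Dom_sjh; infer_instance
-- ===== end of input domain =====

-- B replaces A's per-position rescans of the suffix by one incremental lazy-deletion
-- priority pool (sorted list of (-value, index) entries for even suffix elements);
-- measured constant-factor speed-up. The equivalence proved is about the RETURN value
-- (both Pythons also mutate `a` in place, and do so identically).

-- ===== PORT A =====
def sjh (a : List Int) : List Int :=
  (PySem.List.pyRange 0 a.length 1).foldl (fun a i =>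
    let foo := (PySem.List.pyRange (i + 1) a.length 1).foldl
      (fun foo j =>
        if PySem.List.pyGetD a foo 0 < PySem.List.pyGetD a j 0 ∧
           PySem.Int.mod (PySem.List.pyGetD a j 0) 2 = 0 then j else foo) i
    let ai := PySem.List.pyGetD a i 0
    let afoo := PySem.List.pyGetD a foo 0
    PySem.List.pySetD (PySem.List.pySetD a i afoo) foo ai) a

-- ===== PORT B =====
-- `_push`: the scan-then-insert loop of Source B, as the obvious structural recursion
-- (walk past the strictly smaller prefix, insert there).
def sjhPush : List (Int × Int) → Int × Int → List (Int × Int)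
  | [], e => [e]
  | x :: t, e =>
      if x.1 < e.1 ∨ (x.1 = e.1 ∧ x.2 < e.2) then x :: sjhPush t e else e :: x :: t

-- the `while heap and (stale or expired): heap.pop(0)` loop
def sjhClean (a : List Int) (i : Int) : List (Int × Int) → List (Int × Int)
  | [] => []
  | (p, j) :: t =>
      if j ≤ i ∨ PySem.List.pyGetD a j 0 ≠ -p then sjhClean a i t else (p, j) :: t

-- one iteration of Source B's main loop on the state (a, heap)
def sjhStep (s : List Int × List (Int × Int)) (i : Int) : List Int × List (Int × Int) :=
  match sjhClean s.1 i s.2 with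
  | [] => (s.1, [])
  | (p, j) :: t =>
      if PySem.List.pyGetD s.1 i 0 < -p then
        -- `old` in Source B is s.1[i], read before the two writes
        (PySem.List.pySetD (PySem.List.pySetD s.1 i (-p)) j (PySem.List.pyGetD s.1 i 0),
         if PySem.Int.mod (PySem.List.pyGetD s.1 i 0) 2 = 0
         then sjhPush t (-(PySem.List.pyGetD s.1 i 0), j) else t)
      else (s.1, (p, j) :: t)

def sjh_alt (a : List Int) : List Int :=
  let h0 := (PySem.List.pyRange 1 a.length 1).foldl
    (fun h j => if PySem.Int.mod (PySem.List.pyGetD a j 0) 2 = 0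
                then sjhPush h (-(PySem.List.pyGetD a j 0), j) else h) []
  ((PySem.List.pyRange 0 a.length 1).foldl sjhStep (a, h0)).1

-- ===== PRECONDITION & SPEC =====
def Spec_sjh (a : List Int) (out : List Int) : Prop := out = sjh_alt a
instance (a : List Int) (out : List Int) : Decidable (Spec_sjh a out) := by unfold Spec_sjh; infer_instance

-- ===== CLAIM (what is proved, stated in full; the proofs are below) =====
def Claim_equal_sjh : Prop := ∀ (a : List Int), Dom_sjh a → Spec_sjh a (sjh a)

-- ===== LEMMAS AND PROOFS =====

-- strict and non-strict lexicographic order on entries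
def plt (x y : Int × Int) : Prop := x.1 < y.1 ∨ (x.1 = y.1 ∧ x.2 < y.2)
def ple (x y : Int × Int) : Prop := x.1 < y.1 ∨ (x.1 = y.1 ∧ x.2 ≤ y.2)

-- the left-biased lexicographic max used on the A side (candidates are (value, -index))
def keep (b c : Int × Int) : Int × Int :=
  if b.1 < c.1 ∨ (b.1 = c.1 ∧ b.2 < c.2) then c else b

theorem keep_right {b c : Int × Int} (h : b.1 < c.1 ∨ (b.1 = c.1 ∧ b.2 < c.2)) :
    keep b c = c := if_pos h

theorem keep_left {b c : Int × Int} (h : ¬ (b.1 < c.1 ∨ (b.1 = c.1 ∧ b.2 < c.2))) :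
    keep b c = b := if_neg h

-- A's step function, named for the proofs (the port inlines it)
def fooA (a : List Int) (i : Int) : Int :=
  (PySem.List.pyRange (i + 1) a.length 1).foldl
    (fun foo j =>
      if PySem.List.pyGetD a foo 0 < PySem.List.pyGetD a j 0 ∧
         PySem.Int.mod (PySem.List.pyGetD a j 0) 2 = 0 then j else foo) i

def stepA (a : List Int) (i : Int) : List Int :=
  PySem.List.pySetD (PySem.List.pySetD a i (PySem.List.pyGetD a (fooA a i) 0)) (fooA a i)
    (PySem.List.pyGetD a i 0)

theorem sjh_eq_foldl (a : List Int) :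
    sjh a = (PySem.List.pyRange 0 a.length 1).foldl stepA a := rfl

-- the candidate list of position i: (value, -index) of even suffix elements
def cands (a : List Int) (i : Int) : List (Int × Int) :=
  (PySem.List.pyRange (i + 1) a.length 1).filterMap
    (fun j => if PySem.Int.mod (PySem.List.pyGetD a j 0) 2 = 0
              then some (PySem.List.pyGetD a j 0, -j) else none)

theorem keep_assoc (x y z : Int × Int) : keep (keep x y) z = keep x (keep y z) := by
  rcases x with ⟨x1, x2⟩; rcases y with ⟨y1, y2⟩; rcases z with ⟨z1, z2⟩
  simp only [keep]
  split_ifs <;> first | rfl | (exfalso; omega)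

theorem foldl_keep_factor (cs : List (Int × Int)) (s c : Int × Int) :
    cs.foldl keep (keep s c) = keep s (cs.foldl keep c) := by
  induction cs generalizing c with
  | nil => rfl
  | cons d cs ih =>
      simp only [List.foldl_cons]
      rw [keep_assoc, ih]

theorem foldl_keep_mem (cs : List (Int × Int)) (c : Int × Int) :
    cs.foldl keep c ∈ c :: cs := by
  induction cs generalizing c with
  | nil => simp
  | cons d cs ih =>
      simp only [List.foldl_cons]
      have hk : keep c d = c ∨ keep c d = d := by
        unfold keep; split_ifs <;> simp
      rcases hk with h'' | h''
      · rw [h'']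
        rcases List.mem_cons.mp (ih c) with h' | h' <;> simp [h']
      · rw [h'']
        rcases List.mem_cons.mp (ih d) with h' | h' <;> simp [h']

-- the fold of `keep` dominates every element it saw
theorem foldl_keep_ge (cs : List (Int × Int)) (c : Int × Int) :
    ∀ x ∈ c :: cs, ¬ plt (cs.foldl keep c) x := by
  induction cs generalizing c with
  | nil =>
      intro x hx
      simp only [List.mem_cons, List.not_mem_nil, or_false] at hx
      subst hx
      simp only [List.foldl_nil]
      unfold plt; omega
  | cons d cs ih =>
      intro x hx
      simp only [List.foldl_cons]
      have hkle1 : ¬ plt (keep c d) c := by unfold keep plt; split_ifs <;> omega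
      have hkle2 : ¬ plt (keep c d) d := by unfold keep plt; split_ifs <;> omega
      have h1 := ih (keep c d) (keep c d) List.mem_cons_self
      rcases List.mem_cons.mp hx with hxc | hx'
      · subst hxc; unfold plt at *; omega
      · rcases List.mem_cons.mp hx' with hxd | hx''
        · subst hxd; unfold plt at *; omega
        · exact ih (keep c d) x (List.mem_cons_of_mem _ hx'')

-- A's inner chained scan, as a fold of `keep` over (value, -index) pairs
theorem chain_eq_keep (val : Int → Int) (L : List Int) :
    ∀ f : Int, L.Pairwise (· < ·) → (∀ j ∈ L, f < j) →
    (L.foldl (fun foo j =>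
        if val foo < val j ∧ PySem.Int.mod (val j) 2 = 0 then j else foo) f)
      = - (L.foldl (fun b j =>
            if PySem.Int.mod (val j) 2 = 0 then keep b (val j, -j) else b)
          (val f, -f)).2 := by
  induction L with
  | nil => intro f _ _; simp
  | cons j rest ih =>
      intro f hpw hlt
      have hfj : f < j := hlt j List.mem_cons_self
      have hrest_pw : rest.Pairwise (· < ·) := (List.pairwise_cons.mp hpw).2
      have hj_rest : ∀ k ∈ rest, j < k := (List.pairwise_cons.mp hpw).1
      simp only [List.foldl_cons]
      by_cases hev : PySem.Int.mod (val j) 2 = 0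
      · by_cases hcmp : val f < val j
        · rw [if_pos (show val f < val j ∧ PySem.Int.mod (val j) 2 = 0 from ⟨hcmp, hev⟩),
              if_pos hev, keep_right (Or.inl hcmp)]
          exact ih j hrest_pw hj_rest
        · have hno : ¬ ((val f, -f).1 < (val j, -j).1 ∨
              ((val f, -f).1 = (val j, -j).1 ∧ (val f, -f).2 < (val j, -j).2)) := by
            intro hor
            rcases hor with h' | ⟨_, h2⟩
            · exact hcmp h'
            · have h2' : (-f : Int) < -j := h2
              omega
          rw [if_neg (show ¬ (val f < val j ∧ PySem.Int.mod (val j) 2 = 0) from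
                fun h => hcmp h.1), if_pos hev, keep_left hno]
          exact ih f hrest_pw (fun k hk' => lt_trans hfj (hj_rest k hk'))
      · rw [if_neg (show ¬ (val f < val j ∧ PySem.Int.mod (val j) 2 = 0) from
              fun h => hev h.2), if_neg hev]
        exact ih f hrest_pw (fun k hk' => lt_trans hfj (hj_rest k hk'))

-- fold over the filterMap of candidates = fold of the guarded step
theorem foldl_keep_filterMap (val : Int → Int) (L : List Int) (s : Int × Int) :
    (L.filterMap (fun j => if PySem.Int.mod (val j) 2 = 0
                           then some (val j, -j) else none)).foldl keep s
      = L.foldl (fun b j =>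
          if PySem.Int.mod (val j) 2 = 0 then keep b (val j, -j) else b) s := by
  rw [List.foldl_filterMap]
  apply List.foldl_ext
  intro b j _
  by_cases hev : PySem.Int.mod (val j) 2 = 0
  · rw [if_pos hev, if_pos hev]
  · rw [if_neg hev, if_neg hev]

-- every candidate is (a[j], -j) for some j in the range, with a[j] even
theorem mem_cands (a : List Int) (i : Int) (c : Int × Int) (h : c ∈ cands a i) :
    ∃ j ∈ PySem.List.pyRange (i + 1) a.length 1,
      PySem.Int.mod (PySem.List.pyGetD a j 0) 2 = 0 ∧ c = (PySem.List.pyGetD a j 0, -j) := by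
  rcases List.mem_filterMap.mp h with ⟨j, hj, hc⟩
  by_cases hev : PySem.Int.mod (PySem.List.pyGetD a j 0) 2 = 0
  · rw [if_pos hev] at hc
    exact ⟨j, hj, hev, (Option.some.inj hc).symm⟩
  · rw [if_neg hev] at hc
    cases hc

theorem cands_mem_of (a : List Int) (i j : Int)
    (hj : j ∈ PySem.List.pyRange (i + 1) a.length 1)
    (hev : PySem.Int.mod (PySem.List.pyGetD a j 0) 2 = 0) :
    (PySem.List.pyGetD a j 0, -j) ∈ cands a i := by
  exact List.mem_filterMap.mpr ⟨j, hj, by rw [if_pos hev]⟩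

-- writing back a[i] at i (twice) is the identity, for an in-range i
theorem set_self_twice (a : List Int) (i : Int) (h1 : 0 ≤ i) (h2 : i < (a.length : Int)) :
    PySem.List.pySetD (PySem.List.pySetD a i (PySem.List.pyGetD a i 0)) i
      (PySem.List.pyGetD a i 0) = a := by
  have ht : i.toNat < a.length := by omega
  rw [PySem.List.pyGetD_eq_getElem a 0 h1 h2,
      PySem.List.pySetD_of_nonneg _ _ h1, PySem.List.pySetD_of_nonneg _ _ h1,
      List.set_getElem_self ht, List.set_getElem_self ht]

-- reading through a double write (all indices in range, k distinct from both writes)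
theorem getD_swap_other (a : List Int) (i j k v w : Int)
    (hi : 0 ≤ i) (hj : 0 ≤ j) (hk0 : 0 ≤ k) (hk1 : k < (a.length : Int))
    (hki : k ≠ i) (hkj : k ≠ j) :
    PySem.List.pyGetD (PySem.List.pySetD (PySem.List.pySetD a i v) j w) k 0
      = PySem.List.pyGetD a k 0 := by
  rw [PySem.List.pySetD_of_nonneg _ _ hi, PySem.List.pySetD_of_nonneg _ _ hj]
  have hl1 : ((a.set i.toNat v).length : Int) = (a.length : Int) := by simp
  have hl2 : (((a.set i.toNat v).set j.toNat w).length : Int) = (a.length : Int) := by simp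
  rw [PySem.List.pyGetD_eq_getElem _ 0 hk0 (by omega),
      PySem.List.pyGetD_eq_getElem a 0 hk0 hk1]
  have h1 : k.toNat ≠ i.toNat := fun h => hki (by omega)
  have h2 : k.toNat ≠ j.toNat := fun h => hkj (by omega)
  simp [h1.symm, h2.symm]

theorem getD_swap_j (a : List Int) (i j v w : Int)
    (hi : 0 ≤ i) (hj0 : 0 ≤ j) (hj1 : j < (a.length : Int)) :
    PySem.List.pyGetD (PySem.List.pySetD (PySem.List.pySetD a i v) j w) j 0 = w := by
  rw [PySem.List.pySetD_of_nonneg _ _ hi, PySem.List.pySetD_of_nonneg _ _ hj0]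
  rw [PySem.List.pyGetD_eq_getElem _ 0 hj0 (by simp; omega)]
  have hjl : j.toNat < (a.set i.toNat v).length := by simp; omega
  simp

-- even integers stay even under negation (Python mod 2)
theorem mod_neg_even (p : Int) (h : PySem.Int.mod p 2 = 0) :
    PySem.Int.mod (-p) 2 = 0 := by
  exact (PySem.Int.mod_eq_zero_iff_dvd (-p) 2).mpr
    (dvd_neg.mpr ((PySem.Int.mod_eq_zero_iff_dvd p 2).mp h))

-- ===== pool (heap) lemmas =====

theorem mem_sjhPush (t : List (Int × Int)) (e x : Int × Int) :
    x ∈ sjhPush t e ↔ x = e ∨ x ∈ t := by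
  induction t with
  | nil => simp [sjhPush]
  | cons y t ih =>
      unfold sjhPush
      split_ifs with h
      · simp [ih]; tauto
      · simp

theorem sjhPush_sorted (t : List (Int × Int)) (e : Int × Int)
    (h : t.Pairwise ple) : (sjhPush t e).Pairwise ple := by
  induction t with
  | nil => simp [sjhPush]
  | cons y t ih =>
      have hy : ∀ z ∈ t, ple y z := (List.pairwise_cons.mp h).1
      have ht : t.Pairwise ple := (List.pairwise_cons.mp h).2
      unfold sjhPush
      split_ifs with hlt
      · refine List.pairwise_cons.mpr ⟨?_, ih ht⟩
        intro z hz
        rcases (mem_sjhPush t e z).mp hz with rfl | hz'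
        · unfold ple; unfold plt at *; omega
        · exact hy z hz'
      · refine List.pairwise_cons.mpr ⟨?_, h⟩
        intro z hz
        rcases List.mem_cons.mp hz with rfl | hz'
        · unfold ple; omega
        · have := hy z hz'
          unfold ple at *; omega

theorem sjhClean_suffix (a : List Int) (i : Int) (h : List (Int × Int)) :
    (sjhClean a i h).Sublist h := by
  induction h with
  | nil => simp [sjhClean]
  | cons y t ih =>
      obtain ⟨p, j⟩ := y
      unfold sjhClean
      split_ifs with hc
      · exact ih.cons _
      · exact List.Sublist.refl _

theorem sjhClean_keeps (a : List Int) (i : Int) (h : List (Int × Int))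
    (e : Int × Int) (he : e ∈ h) (h1 : i < e.2)
    (h2 : PySem.List.pyGetD a e.2 0 = -e.1) : e ∈ sjhClean a i h := by
  induction h with
  | nil => cases he
  | cons y t ih =>
      obtain ⟨p, j⟩ := y
      unfold sjhClean
      split_ifs with hc
      · rcases List.mem_cons.mp he with rfl | he'
        · exfalso
          rcases hc with hc | hc
          · simp at h1; omega
          · exact hc h2
        · exact ih he'
      · exact he

theorem sjhClean_head (a : List Int) (i : Int) (h : List (Int × Int))
    (p j : Int) (t : List (Int × Int)) (heq : sjhClean a i h = (p, j) :: t) :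
    i < j ∧ PySem.List.pyGetD a j 0 = -p := by
  induction h with
  | nil => simp [sjhClean] at heq
  | cons y t' ih =>
      obtain ⟨q, k⟩ := y
      unfold sjhClean at heq
      split_ifs at heq with hc
      · exact ih heq
      · rw [not_or] at hc
        injection heq with hhd htl
        injection hhd with hq hk
        subst hq; subst hk
        exact ⟨by omega, not_not.mp hc.2⟩

-- the invariant carried by the pool between iterations
def PoolInv (a : List Int) (i : Int) (h : List (Int × Int)) : Prop :=
  h.Pairwise ple ∧
  (∀ e ∈ h, PySem.Int.mod e.1 2 = 0 ∧ 0 ≤ e.2 ∧ e.2 < (a.length : Int)) ∧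
  (∀ j : Int, i < j → j < (a.length : Int) →
      PySem.Int.mod (PySem.List.pyGetD a j 0) 2 = 0 →
      (-(PySem.List.pyGetD a j 0), j) ∈ h)

theorem length_stepA (a : List Int) (i : Int) : (stepA a i).length = a.length := by
  unfold stepA
  simp [PySem.List.length_pySetD]

-- the heart of the file: one iteration of B agrees with one iteration of A
-- and re-establishes the invariant
-- the A-side scan result, as the keep-fold over the candidate list
theorem fooA_eq (a : List Int) (i : Int) :
    fooA a i = -((cands a i).foldl keep (PySem.List.pyGetD a i 0, -i)).2 := by
  unfold fooA
  rw [chain_eq_keep (fun k => PySem.List.pyGetD a k 0) _ i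
        (PySem.List.pairwise_lt_pyRange_one (i + 1) a.length)
        (fun j hj => by
          have := (PySem.List.mem_pyRange_one (a := i + 1)
            (b := (a.length : Int)) (x := j)).mp hj
          omega),
      ← foldl_keep_filterMap (fun k => PySem.List.pyGetD a k 0)]
  rfl

theorem step_main (a : List Int) (h : List (Int × Int)) (i : Int)
    (hInv : PoolInv a i h) (h0 : 0 ≤ i) (h1 : i < (a.length : Int)) :
    (sjhStep (a, h) i).1 = stepA a i ∧
      PoolInv (sjhStep (a, h) i).1 (i + 1) (sjhStep (a, h) i).2 := by
  obtain ⟨hSort, hWF, hComp⟩ := hInv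
  have hsubset := (sjhClean_suffix a i h).subset
  have hSortC : (sjhClean a i h).Pairwise ple := hSort.sublist (sjhClean_suffix a i h)
  -- every even suffix element has its (still valid) entry surviving the clean
  have hcand_entry : ∀ k : Int, i < k → k < (a.length : Int) →
      PySem.Int.mod (PySem.List.pyGetD a k 0) 2 = 0 →
      (-(PySem.List.pyGetD a k 0), k) ∈ sjhClean a i h := by
    intro k hk1 hk2 hkev
    exact sjhClean_keeps a i h _ (hComp k hk1 hk2 hkev) hk1 (by simp)
  cases hcl : sjhClean a i h with
  | nil =>
      -- no candidates at all
      have hnoc : cands a i = [] := by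
        cases hcc : cands a i with
        | nil => rfl
        | cons c cs =>
            exfalso
            obtain ⟨j', hj', hev', rfl⟩ :=
              mem_cands a i c (hcc ▸ List.mem_cons_self)
            have hj'' := (PySem.List.mem_pyRange_one (a := i + 1)
              (b := (a.length : Int)) (x := j')).mp hj'
            have := hcand_entry j' (by omega) (by omega) hev'
            rw [hcl] at this
            cases this
      have hfoo := fooA_eq a i
      rw [hnoc] at hfoo
      simp only [List.foldl_nil, neg_neg] at hfoo
      have hA : stepA a i = a := by
        unfold stepA
        rw [hfoo]
        exact set_self_twice a i h0 h1
      have hB : sjhStep (a, h) i = (a, []) := by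
        simp only [sjhStep, hcl]
      constructor
      · rw [hB, hA]
      · rw [hB]
        refine ⟨List.Pairwise.nil, by simp, ?_⟩
        intro k hk1 hk2 hkev
        have := hcand_entry k (by omega) hk2 hkev
        rw [hcl] at this
        cases this
  | cons hd t =>
      obtain ⟨p, j⟩ := hd
      obtain ⟨hij, haj⟩ := sjhClean_head a i h p j t hcl
      have hmemh : (p, j) ∈ h := hsubset (hcl ▸ List.mem_cons_self)
      obtain ⟨hpev, hj0, hjlen⟩ := hWF (p, j) hmemh
      have hjev : PySem.Int.mod (PySem.List.pyGetD a j 0) 2 = 0 := by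
        rw [haj]; exact mod_neg_even p hpev
      have hch : (PySem.List.pyGetD a j 0, -j) ∈ cands a i :=
        cands_mem_of a i j ((PySem.List.mem_pyRange_one).mpr ⟨by omega, by omega⟩) hjev
      -- the keep-fold over the candidates lands exactly on the head entry
      have hmax : ∀ s : Int × Int, (cands a i).foldl keep s
          = keep s (PySem.List.pyGetD a j 0, -j) := by
        intro s
        cases hcc : cands a i with
        | nil => rw [hcc] at hch; cases hch
        | cons c cs =>
            rw [List.foldl_cons, foldl_keep_factor]
            congr 1
            -- the fold maximum m equals the head-entry candidate
            have hm_mem := foldl_keep_mem cs c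
            obtain ⟨jr, hjr, hevr, hmr⟩ := mem_cands a i _ (hcc ▸ hm_mem)
            have hjr' := (PySem.List.mem_pyRange_one (a := i + 1)
              (b := (a.length : Int)) (x := jr)).mp hjr
            have her : (-(PySem.List.pyGetD a jr 0), jr) ∈ sjhClean a i h :=
              hcand_entry jr (by omega) (by omega) hevr
            rw [hcl] at her
            have hge : ¬ plt (cs.foldl keep c) (PySem.List.pyGetD a j 0, -j) :=
              foldl_keep_ge cs c _ (hcc ▸ hch)
            rcases List.mem_cons.mp her with hercase | hercase
            · -- the maximum's entry IS the head
              have h1 : -(PySem.List.pyGetD a jr 0) = p := congrArg Prod.fst hercase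
              have h2 : jr = j := congrArg Prod.snd hercase
              rw [hmr, h2]
            · -- it sits behind the head: head ≤ it, and it ≥ head ⇒ equal
              have hple : ple (p, j) (-(PySem.List.pyGetD a jr 0), jr) :=
                (List.pairwise_cons.mp (hcl ▸ hSortC)).1 _ hercase
              rw [hmr]
              rw [hmr] at hge
              simp only [ple, plt] at hple hge
              have hv : PySem.List.pyGetD a jr 0 = PySem.List.pyGetD a j 0 ∧ jr = j := by
                rw [haj]; constructor <;> omega
              rw [hv.1, hv.2]
      have hfoo := fooA_eq a i
      rw [hmax] at hfoo
      by_cases hlt : PySem.List.pyGetD a i 0 < -p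
      · have hkeep : keep (PySem.List.pyGetD a i 0, -i) (PySem.List.pyGetD a j 0, -j)
            = (PySem.List.pyGetD a j 0, -j) :=
          keep_right (by rw [haj]; exact Or.inl hlt)
        rw [hkeep] at hfoo
        simp only [neg_neg] at hfoo
        have hA : stepA a i
            = PySem.List.pySetD (PySem.List.pySetD a i (-p)) j (PySem.List.pyGetD a i 0) := by
          unfold stepA
          rw [hfoo, haj]

        have hB : sjhStep (a, h) i
            = (PySem.List.pySetD (PySem.List.pySetD a i (-p)) j (PySem.List.pyGetD a i 0),
               if PySem.Int.mod (PySem.List.pyGetD a i 0) 2 = 0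
               then sjhPush t (-(PySem.List.pyGetD a i 0), j) else t) := by
          simp only [sjhStep, hcl]
          rw [if_pos hlt]
        set a' := PySem.List.pySetD (PySem.List.pySetD a i (-p)) j (PySem.List.pyGetD a i 0)
          with ha'
        have hlen' : (a'.length : Int) = (a.length : Int) := by
          rw [ha']; simp [PySem.List.length_pySetD]
        have hgetj : PySem.List.pyGetD a' j 0 = PySem.List.pyGetD a i 0 :=
          getD_swap_j a i j (-p) (PySem.List.pyGetD a i 0) h0 hj0 hjlen
        have hgetk : ∀ k : Int, 0 ≤ k → k < (a.length : Int) → k ≠ i → k ≠ j →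
            PySem.List.pyGetD a' k 0 = PySem.List.pyGetD a k 0 := fun k hk0 hk1 hki hkj =>
          getD_swap_other a i j k (-p) (PySem.List.pyGetD a i 0) h0 hj0 hk0 hk1 hki hkj
        have htsub : ∀ e ∈ t, e ∈ h := fun e he =>
          hsubset (hcl ▸ List.mem_cons_of_mem _ he)
        have htSort : t.Pairwise ple := (List.pairwise_cons.mp (hcl ▸ hSortC)).2
        have hB1 : (sjhStep (a, h) i).1
            = PySem.List.pySetD (PySem.List.pySetD a i (-p)) j (PySem.List.pyGetD a i 0) := by
          rw [hB]
        have hB2 : (sjhStep (a, h) i).2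
            = if PySem.Int.mod (PySem.List.pyGetD a i 0) 2 = 0
              then sjhPush t (-(PySem.List.pyGetD a i 0), j) else t := by
          rw [hB]
        rw [hB1, hB2, hA, ← ha']
        constructor
        · rfl
        · refine ⟨?_, ?_, ?_⟩
          · -- sorted
            by_cases hov : PySem.Int.mod (PySem.List.pyGetD a i 0) 2 = 0
            · rw [if_pos hov]
              exact sjhPush_sorted t _ htSort
            · rw [if_neg hov]
              exact htSort
          · -- well-formed entries
            intro e he
            have hem : e = (-(PySem.List.pyGetD a i 0), j) ∨ e ∈ t := by
              by_cases hov : PySem.Int.mod (PySem.List.pyGetD a i 0) 2 = 0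
              · rw [if_pos hov] at he
                exact (mem_sjhPush t _ e).mp he
              · rw [if_neg hov] at he
                exact Or.inr he
            rcases hem with rfl | he'
            · refine ⟨?_, by simpa [hlen'] using And.intro hj0 hjlen⟩
              by_cases hov : PySem.Int.mod (PySem.List.pyGetD a i 0) 2 = 0
              · exact mod_neg_even _ hov
              · exfalso
                rw [if_neg hov] at he
                have := hWF _ (htsub _ he)
                exact hov (by simpa using (mod_neg_even _ this.1))
            · have := hWF e (htsub e he')
              exact ⟨this.1, this.2.1, by omega⟩
          · -- completeness at i+1
            intro k hk1 hk2 hkev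
            rw [hlen'] at hk2
            by_cases hkj : k = j
            · subst hkj
              rw [hgetj] at hkev ⊢
              rw [if_pos hkev]
              exact (mem_sjhPush _ _ _).mpr (Or.inl rfl)
            · have hkk := hgetk k (by omega) hk2 (by omega) hkj
              rw [hkk] at hkev ⊢
              have hin := hcand_entry k (by omega) hk2 hkev
              rw [hcl] at hin
              rcases List.mem_cons.mp hin with heq' | hin'
              · exfalso
                exact hkj (congrArg Prod.snd heq')
              · by_cases hov : PySem.Int.mod (PySem.List.pyGetD a i 0) 2 = 0
                · rw [if_pos hov]
                  exact (mem_sjhPush _ _ _).mpr (Or.inr hin')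
                · rw [if_neg hov]
                  exact hin'
      · have hkeep : keep (PySem.List.pyGetD a i 0, -i) (PySem.List.pyGetD a j 0, -j)
            = (PySem.List.pyGetD a i 0, -i) := by
          apply keep_left
          rw [haj]
          simp only
          intro hor
          rcases hor with h' | ⟨_, h2⟩
          · exact hlt h'
          · omega
        rw [hkeep] at hfoo
        simp only [neg_neg] at hfoo
        have hA : stepA a i = a := by
          unfold stepA
          rw [hfoo]
          exact set_self_twice a i h0 h1
        have hB : sjhStep (a, h) i = (a, (p, j) :: t) := by
          simp only [sjhStep, hcl]
          rw [if_neg hlt]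
        have hB1 : (sjhStep (a, h) i).1 = a := by rw [hB]
        have hB2 : (sjhStep (a, h) i).2 = (p, j) :: t := by rw [hB]
        rw [hB1, hB2, hA]
        refine ⟨rfl, hcl ▸ hSortC, ?_, ?_⟩
        · intro e he
          exact hWF e (hsubset (hcl ▸ he))
        · intro k hk1 hk2 hkev
          have := hcand_entry k (by omega) hk2 hkev
          rw [hcl] at this
          exact this

-- B's initial pool build: its step function
def initStep (a : List Int) (h : List (Int × Int)) (j : Int) : List (Int × Int) :=
  if PySem.Int.mod (PySem.List.pyGetD a j 0) 2 = 0
  then sjhPush h (-(PySem.List.pyGetD a j 0), j) else h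

theorem initfold_mono (a : List Int) (L : List Int) (h : List (Int × Int))
    (e : Int × Int) (he : e ∈ h) : e ∈ L.foldl (initStep a) h := by
  induction L generalizing h with
  | nil => exact he
  | cons j L ih =>
      apply ih
      unfold initStep
      split_ifs
      · exact (mem_sjhPush _ _ _).mpr (Or.inr he)
      · exact he

theorem initfold_mem (a : List Int) (L : List Int) (h : List (Int × Int))
    (j : Int) (hj : j ∈ L) (hev : PySem.Int.mod (PySem.List.pyGetD a j 0) 2 = 0) :
    (-(PySem.List.pyGetD a j 0), j) ∈ L.foldl (initStep a) h := by
  induction L generalizing h with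
  | nil => cases hj
  | cons k L ih =>
      rcases List.mem_cons.mp hj with rfl | hj'
      · rw [List.foldl_cons]
        apply initfold_mono
        unfold initStep
        rw [if_pos hev]
        exact (mem_sjhPush _ _ _).mpr (Or.inl rfl)
      · exact ih _ hj'

theorem initfold_sorted (a : List Int) (L : List Int) (h : List (Int × Int))
    (hs : h.Pairwise ple) : (L.foldl (initStep a) h).Pairwise ple := by
  induction L generalizing h with
  | nil => exact hs
  | cons j L ih =>
      apply ih
      unfold initStep
      split_ifs
      · exact sjhPush_sorted _ _ hs
      · exact hs

theorem initfold_wf (a : List Int) (L : List Int) (h : List (Int × Int))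
    (hh : ∀ e ∈ h, PySem.Int.mod e.1 2 = 0 ∧ 0 ≤ e.2 ∧ e.2 < (a.length : Int))
    (hL : ∀ j ∈ L, 0 ≤ j ∧ j < (a.length : Int)) :
    ∀ e ∈ L.foldl (initStep a) h,
      PySem.Int.mod e.1 2 = 0 ∧ 0 ≤ e.2 ∧ e.2 < (a.length : Int) := by
  induction L generalizing h with
  | nil => exact hh
  | cons j L ih =>
      apply ih
      · intro e he
        unfold initStep at he
        split_ifs at he with hev
        · rcases (mem_sjhPush _ _ _).mp he with rfl | he'
          · exact ⟨mod_neg_even _ hev, (hL j List.mem_cons_self).1,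
              (hL j List.mem_cons_self).2⟩
          · exact hh e he'
        · exact hh e he
      · exact fun k hk => hL k (List.mem_cons_of_mem _ hk)

theorem init_inv (a : List Int) :
    PoolInv a 0 ((PySem.List.pyRange 1 a.length 1).foldl
      (fun h j => if PySem.Int.mod (PySem.List.pyGetD a j 0) 2 = 0
                  then sjhPush h (-(PySem.List.pyGetD a j 0), j) else h) []) := by
  have hstep : (fun (h : List (Int × Int)) (j : Int) =>
      if PySem.Int.mod (PySem.List.pyGetD a j 0) 2 = 0
      then sjhPush h (-(PySem.List.pyGetD a j 0), j) else h) = initStep a := rfl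
  rw [hstep]
  refine ⟨initfold_sorted a _ _ List.Pairwise.nil,
    initfold_wf a _ _ (by simp) ?_, ?_⟩
  · intro j hj
    have := (PySem.List.mem_pyRange_one (a := 1) (b := (a.length : Int)) (x := j)).mp hj
    omega
  · intro j hj1 hj2 hjev
    exact initfold_mem a _ _ j
      ((PySem.List.mem_pyRange_one).mpr ⟨by omega, hj2⟩) hjev

theorem outer_eq (n : Nat) : ∀ (fuel : Nat) (k : Int) (a : List Int) (h : List (Int × Int)),
    a.length = n → 0 ≤ k → ((n : Int) - k).toNat = fuel → PoolInv a k h →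
    ((PySem.List.pyRange k n 1).foldl sjhStep (a, h)).1
      = (PySem.List.pyRange k n 1).foldl stepA a := by
  intro fuel
  induction fuel with
  | zero =>
      intro k a h hlen hk hfuel _
      rw [PySem.List.pyRange_one_eq_nil (by omega)]
      simp
  | succ m ih =>
      intro k a h hlen hk hfuel hInv
      have hkn : k < (n : Int) := by omega
      rw [PySem.List.pyRange_one_cons hkn]
      simp only [List.foldl_cons]
      obtain ⟨heq, hInv'⟩ := step_main a h k hInv hk (by omega)
      have hla : (stepA a k).length = n := by rw [length_stepA, hlen]
      have hstep : sjhStep (a, h) k = (stepA a k, (sjhStep (a, h) k).2) := by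
        rw [← heq]
      rw [hstep]
      exact ih (k + 1) (stepA a k) _ hla (by omega) (by omega) (heq ▸ hInv')

-- ===== VERDICT (by name: the statement is the Claim_ definition above) =====
theorem sjh_spec : Claim_equal_sjh := by
  intro a _
  unfold Spec_sjh sjh_alt
  rw [sjh_eq_foldl]
  exact (outer_eq a.length (((a.length : Int)) - 0).toNat 0 a _ rfl le_rfl rfl
    (init_inv a)).symm
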